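-- pv_equiv track=rewrite | github.com/pypi-data/pypi-mirror-386 | packages/taxing/taxing-0.1.0.tar.gz/taxing-0.1.0/src/core/transfers.py | _extract_name_from_phrase
-- ===== SOURCE A (Python) =====
-- def _extract_name_from_phrase(phrase: str, noise_words: set[str]) -> str | None:
--     """Extract name from a phrase, filtering out noise words."""
--     words = phrase.split()
--     name_words = []
--
--     for word in words:
--         cleaned = word.replace(":", "").replace(",", "")
--         if not cleaned:
--             continue
--         if cleaned in noise_words:
--             if name_words:
--                 break
--             continue
--         name_words.append(cleaned)
--
--     return " ".join(name_words).strip() if name_words else None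
-- ===== SOURCE B (Python) =====
-- from itertools import groupby
--
--
-- def _extract_name_from_phrase(phrase, noise_words):
--     """Extract name from a phrase, filtering out noise words.
--
--     Partition the cleaned words into maximal runs keyed by noise-membership
--     (itertools.groupby) and return the first non-noise run, joined.
--     """
--     cleaned = [c for w in phrase.split() if (c := w.replace(":", "").replace(",", ""))]
--     for is_noise, run in groupby(cleaned, key=lambda w: w in noise_words):
--         if not is_noise:
--             return " ".join(run)
--     return None
-- ===== Notes on version B (the rewrite author's own statement) =====
-- stated objective: alternative
-- what changed: Instead of A's stateful accumulate-then-break loop, B partitions the cleaned word list into maximal runs keyed by noise-membership with itertools.groupby and returns the first non-noise run joined (None if there is none).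
import Mathlib
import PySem

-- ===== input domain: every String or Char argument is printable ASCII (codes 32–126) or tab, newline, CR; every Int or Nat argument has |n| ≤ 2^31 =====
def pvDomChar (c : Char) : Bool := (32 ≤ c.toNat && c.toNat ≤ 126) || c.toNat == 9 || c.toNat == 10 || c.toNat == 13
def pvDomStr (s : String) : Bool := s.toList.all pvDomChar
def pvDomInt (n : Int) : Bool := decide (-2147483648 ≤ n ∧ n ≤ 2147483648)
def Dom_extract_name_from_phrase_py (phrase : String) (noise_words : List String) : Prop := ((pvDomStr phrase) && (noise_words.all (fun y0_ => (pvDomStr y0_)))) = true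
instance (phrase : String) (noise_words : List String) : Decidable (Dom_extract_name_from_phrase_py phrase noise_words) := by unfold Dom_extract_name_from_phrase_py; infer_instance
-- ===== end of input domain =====

-- B replaces A's stateful accumulate-then-break loop by grouping the cleaned words into
-- maximal runs keyed by noise-membership and returning the first non-noise run (same value).

-- word.replace(":", "").replace(",", "")  (shared by both sources, ported once)
def pvClean (w : List Char) : List Char :=
  PySem.Chars.replace (PySem.Chars.replace w [':'] []) [','] []

-- ===== PORT A =====
-- the 'for word in words: … break/continue …' loop, with name_words as the accumulator
def pvLoopA (noise : List (List Char)) : List (List Char) → List (List Char) → List (List Char)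
  | [], acc => acc
  | w :: ws, acc =>
    let c := pvClean w
    if c = [] then pvLoopA noise ws acc
    else if c ∈ noise then
      (if acc = [] then pvLoopA noise ws acc else acc)   -- 'if name_words: break' / 'continue'
    else pvLoopA noise ws (acc ++ [c])

def extract_name_from_phrase_py (phrase : String) (noise_words : List String) : Option String :=
  let words := PySem.Chars.split₀ phrase.toList
  let name_words := pvLoopA (noise_words.map String.toList) words []
  if name_words = [] then none
  else some (String.mk (PySem.Chars.strip (PySem.Chars.join [' '] name_words)))

-- ===== PORT B =====
-- itertools.groupby(·, key): maximal runs of adjacent elements with equal key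
-- (exact for this use: B consumes each run it inspects before advancing)
def pvGroupBy {α : Type} (key : α → Bool) : List α → List (Bool × List α)
  | [] => []
  | x :: xs =>
    match pvGroupBy key xs with
    | [] => [(key x, [x])]
    | (k, g) :: rest => if key x = k then (k, x :: g) :: rest else (key x, [x]) :: (k, g) :: rest

def extract_name_from_phrase_py_alt (phrase : String) (noise_words : List String) : Option String :=
  let noise := noise_words.map String.toList
  let cleaned := ((PySem.Chars.split₀ phrase.toList).map pvClean).filter (fun c => !decide (c = []))
  -- 'for is_noise, run in groupby(...): if not is_noise: return " ".join(run)' / 'return None'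
  match (pvGroupBy (fun w => decide (w ∈ noise)) cleaned).find? (fun g => !g.1) with
  | some (_, run) => some (String.mk (PySem.Chars.join [' '] run))
  | none => none

-- ===== PRECONDITION & SPEC =====
def Spec_extract_name_from_phrase_py (phrase : String) (noise_words : List String) (out : Option String) : Prop := out = extract_name_from_phrase_py_alt phrase noise_words
instance (phrase : String) (noise_words : List String) (out : Option String) : Decidable (Spec_extract_name_from_phrase_py phrase noise_words out) := by unfold Spec_extract_name_from_phrase_py; infer_instance

-- ===== CLAIM (what is proved, stated in full; the proofs are below) =====
def Claim_equal_extract_name_from_phrase_py : Prop := ∀ (phrase : String) (noise_words : List String), Dom_extract_name_from_phrase_py phrase noise_words → Spec_extract_name_from_phrase_py phrase noise_words (extract_name_from_phrase_py phrase noise_words)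

-- ===== LEMMAS AND PROOFS =====

-- cleaned word list B computes, as a function of the word list
def pvCleaned (ws : List (List Char)) : List (List Char) :=
  (ws.map pvClean).filter (fun c => !decide (c = []))

-- once name_words is nonempty, the loop takes the remaining non-noise cleaned words up to the first noise word
theorem pvLoopA_nonempty (noise : List (List Char)) (ws acc : List (List Char)) (h : acc ≠ []) :
    pvLoopA noise ws acc = acc ++ (pvCleaned ws).takeWhile (fun w => !decide (w ∈ noise)) := by
  induction ws generalizing acc with
  | nil => simp [pvLoopA, pvCleaned]
  | cons w ws ih =>
    simp only [pvLoopA, pvCleaned, List.map_cons, List.filter_cons]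
    by_cases hc : pvClean w = []
    · simpa [hc] using ih acc h
    · by_cases hn : pvClean w ∈ noise
      · simp [hc, hn, h]
      · rw [if_neg hc, if_neg hn, ih (acc ++ [pvClean w]) (by simp)]
        simp [hc, hn, pvCleaned]

-- starting from empty, the loop computes the first maximal non-noise block of the cleaned words
theorem pvLoopA_eq_block (noise : List (List Char)) (ws : List (List Char)) :
    pvLoopA noise ws [] =
      ((pvCleaned ws).dropWhile (fun w => decide (w ∈ noise))).takeWhile (fun w => !decide (w ∈ noise)) := by
  induction ws with
  | nil => simp [pvLoopA, pvCleaned]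
  | cons w ws ih =>
    simp only [pvLoopA, pvCleaned, List.map_cons, List.filter_cons]
    by_cases hc : pvClean w = []
    · simpa [hc] using ih
    · by_cases hn : pvClean w ∈ noise
      · simpa [hc, hn, List.dropWhile_cons] using ih
      · rw [if_neg hc, if_neg hn, List.nil_append,
           pvLoopA_nonempty noise ws [pvClean w] (by simp)]
        simp [hc, hn, pvCleaned]

-- unfolding equation for pvGroupBy on a cons
theorem pvGroupBy_cons_eq {α : Type} (key : α → Bool) (x : α) (xs : List α) :
    pvGroupBy key (x :: xs) =
      match pvGroupBy key xs with
      | [] => [(key x, [x])]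
      | (k, g) :: rest => if key x = k then (k, x :: g) :: rest else (key x, [x]) :: (k, g) :: rest := rfl

-- head run of pvGroupBy on a cons: the maximal run of the head's key
theorem pvGroupBy_cons {α : Type} (key : α → Bool) (x : α) (xs : List α) :
    ∃ rest, pvGroupBy key (x :: xs) =
      (key x, x :: xs.takeWhile (fun a => key a = key x)) :: rest := by
  induction xs generalizing x with
  | nil => exact ⟨[], by simp [pvGroupBy]⟩
  | cons y ys ih =>
    obtain ⟨rest, hrest⟩ := ih y
    by_cases hxy : key x = key y
    · refine ⟨rest, ?_⟩
      rw [pvGroupBy_cons_eq, hrest]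
      simp only [hxy, if_pos rfl, List.takeWhile_cons]
      simp [hxy]
    · refine ⟨(key y, y :: ys.takeWhile (fun a => key a = key y)) :: rest, ?_⟩
      rw [pvGroupBy_cons_eq, hrest]
      simp only [if_neg hxy, List.takeWhile_cons]
      have : decide (key y = key x) = false := by
        simp only [decide_eq_false_iff_not]; exact fun h => hxy (Eq.symm h)
      rw [this]
      simp

-- the first run with key false is the dropWhile/takeWhile block
theorem pvFindFalse {α : Type} (key : α → Bool) (l : List α) :
    ((pvGroupBy key l).find? (fun g => !g.1)).map Prod.snd =
      (if (l.dropWhile key).takeWhile (fun a => !key a) = [] then none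
       else some ((l.dropWhile key).takeWhile (fun a => !key a))) := by
  induction l with
  | nil => simp [pvGroupBy]
  | cons x xs ih =>
    by_cases hx : key x = true
    · -- x is noise: the first false run of x::xs is that of xs
      have hstep : ((pvGroupBy key (x :: xs)).find? (fun g => !g.1)).map Prod.snd =
          ((pvGroupBy key xs).find? (fun g => !g.1)).map Prod.snd := by
        rw [pvGroupBy_cons_eq]
        cases hxs : pvGroupBy key xs with
        | nil => simp [List.find?, hx]
        | cons p rest =>
          obtain ⟨k, g⟩ := p
          cases k with
          | true => simp [hx, List.find?_cons]
          | false => simp [hx, List.find?_cons]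
      rw [hstep, ih]
      simp [List.dropWhile_cons, hx]
    · -- x is not noise: the first run is false-keyed and is the block
      have hx' : key x = false := by revert hx; cases key x <;> simp
      obtain ⟨rest, hrest⟩ := pvGroupBy_cons key x xs
      rw [hrest]
      have hpred : (fun a => decide (key a = key x)) = (fun a => !key a) := by
        funext a; rw [hx']; cases key a <;> simp
      simp [List.find?_cons, hx', List.dropWhile_cons, List.takeWhile_cons, hpred]

-- all characters produced by replace(old, "") come from the input string
theorem pvReplaceGo_subset (old : List Char) (fuel : Nat) (l acc : List Char) :
    ∀ c ∈ PySem.Chars.replace.go old [] fuel l acc, c ∈ l ∨ c ∈ acc := by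
  induction fuel generalizing l acc with
  | zero => intro c hc; simp [PySem.Chars.replace.go] at hc; tauto
  | succ fuel ih =>
    intro c hc
    cases l with
    | nil => simp [PySem.Chars.replace.go] at hc; tauto
    | cons a t =>
      simp only [PySem.Chars.replace.go] at hc
      split at hc
      · rcases ih _ _ c hc with h | h
        · exact Or.inl (List.mem_of_mem_drop h)
        · simp at h; tauto
      · rcases ih _ _ c hc with h | h
        · exact Or.inl (List.mem_cons_of_mem _ h)
        · simp at h
          rcases h with h | h
          · exact Or.inl (by simp [h])
          · exact Or.inr h

theorem pvReplace_subset (old : List Char) (hold : old ≠ []) (s : List Char) :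
    ∀ c ∈ PySem.Chars.replace s old [], c ∈ s := by
  intro c hc
  simp only [PySem.Chars.replace] at hc
  rw [if_neg (by simp [hold])] at hc
  rcases pvReplaceGo_subset old s.length s [] c hc with h | h
  · exact h
  · simp at h

theorem pvClean_subset (w : List Char) : ∀ c ∈ pvClean w, c ∈ w := by
  intro c hc
  exact pvReplace_subset [':'] (by simp) w c
    (pvReplace_subset [','] (by simp) _ c hc)

-- every piece produced by str.split() is free of whitespace characters
theorem pvSplitGo_nonspace (s cur : List Char) (acc : List (List Char))
    (hcur : ∀ c ∈ cur, PySem.Chars.isspace c = false)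
    (hacc : ∀ p ∈ acc, ∀ c ∈ p, PySem.Chars.isspace c = false) :
    ∀ p ∈ PySem.Chars.split₀.go s cur acc, ∀ c ∈ p, PySem.Chars.isspace c = false := by
  induction s generalizing cur acc with
  | nil =>
    intro p hp
    simp only [PySem.Chars.split₀.go] at hp
    split at hp
    · exact hacc p (by simpa using hp)
    · simp at hp
      rcases hp with h | h
      · exact hacc p h
      · intro c hc; exact hcur c (by simpa [h] using hc)
  | cons a t ih =>
    intro p hp
    simp only [PySem.Chars.split₀.go] at hp
    split at hp
    · split at hp
      · exact ih [] acc (by simp) hacc p hp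
      · refine ih [] (cur.reverse :: acc) (by simp) ?_ p hp
        intro q hq
        rcases List.mem_cons.mp hq with h | h
        · intro c hc; exact hcur c (by simpa [h] using hc)
        · exact hacc q h
    · refine ih (a :: cur) acc ?_ hacc p hp
      intro c hc
      rcases List.mem_cons.mp hc with h | h
      · subst h; rename_i hsp; simpa using hsp
      · exact hcur c h

theorem pvSplit_nonspace (s : List Char) :
    ∀ p ∈ PySem.Chars.split₀ s, ∀ c ∈ p, PySem.Chars.isspace c = false := by
  simpa [PySem.Chars.split₀] using pvSplitGo_nonspace s [] [] (by simp) (by simp)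

-- " ".join over a list ending in w: w is a suffix
theorem pvJoin_concat (ws : List (List Char)) (w : List Char) :
    PySem.Chars.join [' '] (ws ++ [w]) =
      (if ws = [] then [] else PySem.Chars.join [' '] ws ++ [' ']) ++ w := by
  induction ws with
  | nil => simp [PySem.Chars.join_singleton]
  | cons a t ih =>
    cases t with
    | nil => simp [PySem.Chars.join_cons_cons, PySem.Chars.join_singleton]
    | cons b u =>
      simp only [List.cons_append] at ih ⊢
      rw [PySem.Chars.join_cons_cons, ih]
      simp [PySem.Chars.join_cons_cons, List.append_assoc]

-- strip is the identity on a join of nonempty whitespace-free words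
theorem pvStrip_join (ws : List (List Char)) (hne : ws ≠ [])
    (h : ∀ w ∈ ws, w ≠ [] ∧ ∀ c ∈ w, PySem.Chars.isspace c = false) :
    PySem.Chars.strip (PySem.Chars.join [' '] ws) = PySem.Chars.join [' '] ws := by
  obtain ⟨w0, rest, rfl⟩ : ∃ w0 rest, ws = w0 :: rest := by
    cases ws with
    | nil => exact absurd rfl hne
    | cons a t => exact ⟨a, t, rfl⟩
  obtain ⟨hw0ne, hw0sp⟩ := h w0 (by simp)
  obtain ⟨c0, w0', rfl⟩ : ∃ c t, w0 = c :: t := by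
    cases w0 with
    | nil => exact absurd rfl hw0ne
    | cons a t => exact ⟨a, t, rfl⟩
  obtain ⟨init, wl, hconcat⟩ : ∃ init wl, (c0 :: w0') :: rest = init ++ [wl] := by
    rcases List.eq_nil_or_concat ((c0 :: w0') :: rest) with hnil | ⟨init, wl, hcon⟩
    · simp at hnil
    · exact ⟨init, wl, by simpa [List.concat_eq_append] using hcon⟩
  obtain ⟨hwlne, hwlsp⟩ := h wl (by rw [hconcat]; simp)
  obtain ⟨cl, wl', hrev⟩ : ∃ c t, wl.reverse = c :: t := by
    cases hr : wl.reverse with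
    | nil => exact absurd (by simpa using hr) hwlne
    | cons a t => exact ⟨a, t, rfl⟩
  have hjoin_head : ∃ t, PySem.Chars.join [' '] ((c0 :: w0') :: rest) = c0 :: t := by
    cases rest with
    | nil => exact ⟨w0', by simp [PySem.Chars.join_singleton]⟩
    | cons b u => exact ⟨w0' ++ ' ' :: PySem.Chars.join [' '] (b :: u), by
        simp [PySem.Chars.join_cons_cons]⟩
  have hjoin_last : ∃ t, (PySem.Chars.join [' '] ((c0 :: w0') :: rest)).reverse = cl :: t := by
    rw [hconcat, pvJoin_concat]
    refine ⟨wl' ++ (if init = [] then ([] : List Char) else PySem.Chars.join [' '] init ++ [' ']).reverse, ?_⟩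
    rw [List.reverse_append, hrev]; simp
  obtain ⟨t0, ht0⟩ := hjoin_head
  obtain ⟨tl, htl⟩ := hjoin_last
  have hc0 : PySem.Chars.isspace c0 = false := hw0sp c0 (by simp)
  have hcl : PySem.Chars.isspace cl = false := hwlsp cl (by
    have : cl ∈ wl.reverse := by rw [hrev]; simp
    simpa using this)
  simp only [PySem.Chars.strip, PySem.Chars.lstrip, PySem.Chars.rstrip]
  rw [ht0]
  rw [List.dropWhile_cons, if_neg (by simp [hc0])]
  rw [← ht0, htl, List.dropWhile_cons, if_neg (by simp [hcl]), ← htl]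
  simp

-- the two option-level results agree
theorem pvMain (phrase : String) (noise_words : List String) :
    extract_name_from_phrase_py phrase noise_words = extract_name_from_phrase_py_alt phrase noise_words := by
  have hA : extract_name_from_phrase_py phrase noise_words =
      (if pvLoopA (noise_words.map String.toList) (PySem.Chars.split₀ phrase.toList) [] = [] then none
       else some (String.mk (PySem.Chars.strip (PySem.Chars.join [' ']
         (pvLoopA (noise_words.map String.toList) (PySem.Chars.split₀ phrase.toList) []))))) := rfl
  rw [hA, pvLoopA_eq_block]
  set noise := noise_words.map String.toList with hnoise
  set block := (((pvCleaned (PySem.Chars.split₀ phrase.toList)).dropWhile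
      (fun w => decide (w ∈ noise))).takeWhile
      (fun w => !decide (w ∈ noise))) with hblock
  have hfind : ((pvGroupBy (fun w => decide (w ∈ noise)) (pvCleaned (PySem.Chars.split₀ phrase.toList))).find?
        (fun g => !g.1)).map Prod.snd = (if block = [] then none else some block) := by
    exact pvFindFalse (fun w => decide (w ∈ noise)) (pvCleaned (PySem.Chars.split₀ phrase.toList))
  have hB : extract_name_from_phrase_py_alt phrase noise_words =
      match (pvGroupBy (fun w => decide (w ∈ noise)) (pvCleaned (PySem.Chars.split₀ phrase.toList))).find?
          (fun g => !g.1) with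
      | some (_, run) => some (String.mk (PySem.Chars.join [' '] run))
      | none => none := rfl
  rw [hB]
  by_cases hb : block = []
  · rw [if_pos hb]
    cases hf : (pvGroupBy (fun w => decide (w ∈ noise)) (pvCleaned (PySem.Chars.split₀ phrase.toList))).find?
        (fun g => !g.1) with
    | none => rfl
    | some p => rw [hf] at hfind; simp [hb] at hfind
  · rw [if_neg hb]
    cases hf : (pvGroupBy (fun w => decide (w ∈ noise)) (pvCleaned (PySem.Chars.split₀ phrase.toList))).find?
        (fun g => !g.1) with
    | none => rw [hf] at hfind; simp [hb] at hfind
    | some p =>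
      obtain ⟨k, run⟩ := p
      rw [hf] at hfind
      simp only [Option.map_some, if_neg hb, Option.some.injEq] at hfind
      have hrun : run = block := hfind
      subst hrun
      have hmem : ∀ w ∈ block, w ≠ [] ∧ ∀ c ∈ w, PySem.Chars.isspace c = false := by
        intro w hw
        have h1 : w ∈ pvCleaned (PySem.Chars.split₀ phrase.toList) := by
          rw [hblock] at hw
          exact List.Sublist.subset ((List.takeWhile_sublist _).trans (List.dropWhile_sublist _)) hw
        simp only [pvCleaned, List.mem_filter, List.mem_map] at h1
        obtain ⟨⟨p, hp, rfl⟩, hne⟩ := h1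
        refine ⟨by simpa using hne, fun c hc => pvSplit_nonspace _ p hp c (pvClean_subset p c hc)⟩
      rw [pvStrip_join block hb hmem]

-- ===== VERDICT (by name: the statement is the Claim_ definition above) =====
theorem extract_name_from_phrase_py_spec : Claim_equal_extract_name_from_phrase_py := by
  intro phrase noise_words _
  unfold Spec_extract_name_from_phrase_py
  exact pvMain phrase noise_words
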